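-- pv_equiv track=rewrite | github.com/ThomasSauvage/modal-robot | f1tenth_perso/scripts/utils/iterator.py | middle_range
-- ===== SOURCE A (Python) =====
-- def middle_range(minmum: int, maximum: int):
--     """Iterate over [|minmum, maximum|] by starting at the middle of the range and then going to the edges."""
--
--     center = (minmum + maximum) // 2
--     mid_size = (maximum - minmum) // 2
--     offset = 0  # Offset from the center
--
--     while offset <= mid_size:
--         yield center + offset
--         if offset != 0:
--             yield center - offset
--
--         offset += 1
-- ===== SOURCE B (Python) =====
-- def middle_range(minmum: int, maximum: int):
--     """Iterate over [|minmum, maximum|] from the middle of the range out to the edges."""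
--     center = (minmum + maximum) // 2
--     mid_size = (maximum - minmum) // 2
--     values = list(range(center - mid_size, center + mid_size + 1))
--     values.sort(key=lambda x: 2 * abs(x - center) + (1 if x < center else 0))
--     yield from values
-- ===== Notes on version B (the rewrite author's own statement) =====
-- stated objective: alternative
-- what changed: Instead of interleaving yields while walking outward with an offset loop, B materializes the full symmetric window with range() and sorts it once by the single integer key 2*abs(x-center)+(1 if x<center else 0), which totally orders the window in center-outward order with +offset before -offset, then yields it.
import Mathlib
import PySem

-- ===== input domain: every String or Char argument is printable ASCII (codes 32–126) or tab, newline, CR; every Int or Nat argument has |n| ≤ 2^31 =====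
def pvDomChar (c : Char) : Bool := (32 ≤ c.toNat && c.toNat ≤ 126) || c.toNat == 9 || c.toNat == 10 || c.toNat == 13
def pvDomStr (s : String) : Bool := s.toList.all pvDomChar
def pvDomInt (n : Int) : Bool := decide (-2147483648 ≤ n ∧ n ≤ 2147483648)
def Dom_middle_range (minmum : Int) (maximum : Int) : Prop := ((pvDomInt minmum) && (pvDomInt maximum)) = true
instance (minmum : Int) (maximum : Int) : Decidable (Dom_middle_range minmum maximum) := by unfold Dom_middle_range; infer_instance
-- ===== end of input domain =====

-- B replaces A's outward-walking interleaved yield loop by building the window with range() and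
-- sorting it once by the key 2*abs(x-center)+(1 if x<center else 0); alternative decomposition, not faster.


-- ===== PORT A =====
-- the while loop: fuel = number of remaining iterations, (mid_size - offset + 1).toNat
def pvLoopA (center : Int) (offset : Int) : Nat → List Int
  | 0 => []
  | f + 1 =>
      (center + offset) ::
        ((if offset = 0 then [] else [center - offset]) ++ pvLoopA center (offset + 1) f)

def middle_range (minmum : Int) (maximum : Int) : List Int :=
  let center := PySem.Int.floordiv (minmum + maximum) 2
  let mid_size := PySem.Int.floordiv (maximum - minmum) 2
  pvLoopA center 0 ((mid_size + 1).toNat)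

-- ===== PORT B =====
-- the sort key: lambda x: 2 * abs(x - center) + (1 if x < center else 0)
def pvKey (center : Int) (x : Int) : Int :=
  2 * |x - center| + (if x < center then 1 else 0)

def middle_range_alt (minmum : Int) (maximum : Int) : List Int :=
  let center := PySem.Int.floordiv (minmum + maximum) 2
  let mid_size := PySem.Int.floordiv (maximum - minmum) 2
  let values := PySem.List.pyRange (center - mid_size) (center + mid_size + 1) 1
  PySem.List.sorted values (pvKey center)

-- ===== PRECONDITION & SPEC =====
def Spec_middle_range (minmum : Int) (maximum : Int) (out : List Int) : Prop := out = middle_range_alt minmum maximum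
instance (minmum : Int) (maximum : Int) (out : List Int) : Decidable (Spec_middle_range minmum maximum out) := by unfold Spec_middle_range; infer_instance

-- ===== CLAIM (what is proved, stated in full; the proofs are below) =====
def Claim_equal_middle_range : Prop := ∀ (minmum : Int) (maximum : Int), Dom_middle_range minmum maximum → Spec_middle_range minmum maximum (middle_range minmum maximum)

-- ===== LEMMAS AND PROOFS =====

lemma mem_pvLoopA (c : Int) (f : Nat) (o x : Int) :
    x ∈ pvLoopA c o f ↔ ∃ k : Int, o ≤ k ∧ k < o + f ∧ (x = c + k ∨ x = c - k) := by
  induction f generalizing o with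
  | zero => simp [pvLoopA]; omega
  | succ f ih =>
      by_cases ho : o = 0
      · subst ho
        simp [pvLoopA, ih]
        constructor
        · rintro (rfl | ⟨k, hk1, hk2, h⟩)
          · exact ⟨0, by omega, by omega, Or.inl (by ring)⟩
          · exact ⟨k, by omega, by omega, h⟩
        · rintro ⟨k, hk1, hk2, (rfl | rfl)⟩
          · by_cases hk : k = 0
            · subst hk; left; ring
            · right; exact ⟨k, by omega, by omega, Or.inl rfl⟩
          · by_cases hk : k = 0
            · subst hk; left; ring
            · right; exact ⟨k, by omega, by omega, Or.inr rfl⟩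
      · simp [pvLoopA, ho, ih]
        constructor
        · rintro (rfl | rfl | ⟨k, hk1, hk2, h⟩)
          · exact ⟨o, by omega, by omega, Or.inl rfl⟩
          · exact ⟨o, by omega, by omega, Or.inr rfl⟩
          · exact ⟨k, by omega, by omega, h⟩
        · rintro ⟨k, hk1, hk2, (rfl | rfl)⟩
          · by_cases hk : k = o
            · subst hk; exact Or.inl rfl
            · exact Or.inr (Or.inr ⟨k, by omega, by omega, Or.inl rfl⟩)
          · by_cases hk : k = o
            · subst hk; exact Or.inr (Or.inl rfl)
            · exact Or.inr (Or.inr ⟨k, by omega, by omega, Or.inr rfl⟩)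

lemma pvKey_plus (c k : Int) (hk : 0 ≤ k) : pvKey c (c + k) = 2 * k := by
  have h1 : c + k - c = k := by ring
  have h2 : ¬ (c + k < c) := by omega
  simp [pvKey, h1, abs_of_nonneg hk, h2]

lemma pvKey_minus (c k : Int) (hk : 1 ≤ k) : pvKey c (c - k) = 2 * k + 1 := by
  have h1 : c - k - c = -k := by ring
  have h2 : c - k < c := by omega
  simp [pvKey, h1, abs_neg, abs_of_nonneg (by omega : (0:Int) ≤ k), h2]

lemma pvKey_lb (c : Int) (f : Nat) (o x : Int) (ho : 0 ≤ o) (hx : x ∈ pvLoopA c o f) :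
    2 * o ≤ pvKey c x := by
  rcases (mem_pvLoopA c f o x).1 hx with ⟨k, hk1, hk2, (rfl | rfl)⟩
  · rw [pvKey_plus c k (by omega)]; omega
  · by_cases hk : k = 0
    · subst hk
      have hc : c - (0:Int) = c := by ring
      have h0 : pvKey c c = 0 := by simp [pvKey]
      rw [hc, h0]; omega
    · rw [pvKey_minus c k (by omega)]; omega

lemma nodup_pvLoopA (c : Int) (f : Nat) (o : Int) (ho : 1 ≤ o) :
    (pvLoopA c o f).Nodup := by
  induction f generalizing o with
  | zero => simp [pvLoopA]
  | succ f ih =>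
      have ho' : o ≠ 0 := by omega
      simp only [pvLoopA, if_neg ho', List.singleton_append, List.nodup_cons]
      refine ⟨?_, ?_, ih (o + 1) (by omega)⟩
      · simp only [List.mem_cons, mem_pvLoopA]
        rintro (h | ⟨k, hk1, hk2, (h | h)⟩) <;> omega
      · simp only [mem_pvLoopA]
        rintro ⟨k, hk1, hk2, (h | h)⟩ <;> omega

lemma pairwise_pvLoopA (c : Int) (f : Nat) (o : Int) (ho : 1 ≤ o) :
    (pvLoopA c o f).Pairwise (fun a b => pvKey c a < pvKey c b) := by
  induction f generalizing o with
  | zero => simp [pvLoopA]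
  | succ f ih =>
      have ho' : o ≠ 0 := by omega
      simp only [pvLoopA, if_neg ho', List.singleton_append, List.pairwise_cons]
      refine ⟨?_, ?_, ih (o + 1) (by omega)⟩
      · intro b hb
        rcases List.mem_cons.mp hb with rfl | hb
        · rw [pvKey_plus c o (by omega), pvKey_minus c o ho]; omega
        · have := pvKey_lb c f (o + 1) b (by omega) hb
          rw [pvKey_plus c o (by omega)]; omega
      · intro b hb
        have := pvKey_lb c f (o + 1) b (by omega) hb
        rw [pvKey_minus c o ho]; omega

-- the core identity, stated over center and mid_size directly
lemma core (c m : Int) :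
    pvLoopA c 0 ((m + 1).toNat) =
      PySem.List.sorted (PySem.List.pyRange (c - m) (c + m + 1) 1) (pvKey c) := by
  by_cases hm : m < 0
  · have h0 : (m + 1).toNat = 0 := by omega
    have hr : PySem.List.pyRange (c - m) (c + m + 1) 1 = [] := by
      rw [PySem.List.pyRange_one]
      have : (c + m + 1 - (c - m)).toNat = 0 := by omega
      simp [this]
    rw [h0, hr]
    simp [pvLoopA, PySem.List.sorted]
  · rw [not_lt] at hm
    obtain ⟨n, hn⟩ : ∃ n : Nat, m = (n : Int) := ⟨m.toNat, by omega⟩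
    subst hn
    have hfuel : ((n : Int) + 1).toNat = n + 1 := by omega
    rw [hfuel]
    refine (PySem.List.sorted_eq_of_perm_of_pairwise_lt _ _ _ ?_ ?_).symm
    · -- permutation: nodup on both sides + same membership
      rw [List.perm_ext_iff_of_nodup ?_ (PySem.List.nodup_pyRange_one _ _)]
      · intro x
        rw [mem_pvLoopA, PySem.List.mem_pyRange_one]
        constructor
        · rintro ⟨k, hk1, hk2, (rfl | rfl)⟩ <;> omega
        · rintro ⟨h1, h2⟩
          by_cases hx : c ≤ x
          · exact ⟨x - c, by omega, by omega, Or.inl (by ring)⟩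
          · exact ⟨c - x, by omega, by omega, Or.inr (by ring)⟩
      · -- nodup of the loop output: head c, then the offset ≥ 1 tail
        have : pvLoopA c 0 (n + 1) = c :: pvLoopA c 1 n := by
          simp [pvLoopA]
        rw [this, List.nodup_cons]
        refine ⟨?_, nodup_pvLoopA c n 1 le_rfl⟩
        rw [mem_pvLoopA]
        rintro ⟨k, hk1, hk2, (h | h)⟩ <;> omega
    · -- pairwise strictly increasing keys
      have hsplit : pvLoopA c 0 (n + 1) = c :: pvLoopA c 1 n := by
        simp [pvLoopA]
      rw [hsplit, List.pairwise_cons]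
      refine ⟨?_, pairwise_pvLoopA c n 1 le_rfl⟩
      intro b hb
      have hlb := pvKey_lb c n 1 b (by omega) hb
      have hc : pvKey c c = 0 := by simp [pvKey]
      omega

-- ===== VERDICT (by name: the statement is the Claim_ definition above) =====
theorem middle_range_spec : Claim_equal_middle_range := by
  intro minmum maximum _
  unfold Spec_middle_range middle_range middle_range_alt
  exact core _ _
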